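-- pv_equiv track=rewrite | github.com/JasperGroner/Advent2023 | day14/day14part2.py | move_rocks_cycle
-- ===== SOURCE A (Python) =====
-- def move_rocks_cycle(raw_input: list[list[str]]) -> list[list[str]]:
--     """
--         Make rocks roll north on a pattern that has been rotated ninety degrees
--         so that north is the end of each row of the pattern
--     """
--     transformed = [row[:] for row in raw_input]
--     cycle = ["north", "west", "south", "east"]
--     for current_cycle in cycle:
--         for i, line in enumerate(transformed):
--             for j, _ in enumerate(line):
--                 mod_i = i if current_cycle in ("north", "west") else len(transformed) - 1 - i
--
--                 mod_j = j if current_cycle in ("north", "west") else len(line) - 1 - j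
--
--                 if transformed[mod_i][mod_j] in (".", "#"):
--                     continue
--
--                 current = mod_i if current_cycle in ("north", "south") else mod_j
--
--                 if current_cycle == "north":
--                     while current - 1 >= 0 and transformed[current - 1][mod_j] == ".":
--                         current -= 1
--                 elif current_cycle == "west":
--                     while current - 1 >= 0 and transformed[mod_i][current - 1] == ".":
--                         current -= 1
--                 elif current_cycle == "south":
--                     while current + 1 < len(transformed) and transformed[current + 1][mod_j] == ".":
--                         current += 1
--                 elif current_cycle == "east":
--                     while current + 1 < len(transformed[0]) and transformed[mod_i][current + 1] == ".":
--                         current += 1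
--
--                 if current_cycle in ("north", "south"):
--                     transformed[mod_i][mod_j] = '.'
--                     transformed[current][mod_j] = 'O'
--                 else:
--                     transformed[mod_i][mod_j] = '.'
--                     transformed[mod_i][current] = 'O'
--
--     return transformed
-- ===== SOURCE B (Python) =====
-- def move_rocks_cycle(raw_input: list[list[str]]) -> list[list[str]]:
--     """One N/W/S/E spin cycle: each row/column is rebuilt in a single pass by
--     counting rocks and free spaces per '#'-delimited segment."""
--     if not raw_input or not raw_input[0]:
--         return [row[:] for row in raw_input]
--
--     def roll_left(row):
--         out = []
--         rocks = 0
--         spaces = 0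
--         for cell in row:
--             if cell == "#":
--                 out.extend(["O"] * rocks + ["."] * spaces + ["#"])
--                 rocks = spaces = 0
--             elif cell == ".":
--                 spaces += 1
--             else:
--                 rocks += 1
--         out.extend(["O"] * rocks + ["."] * spaces)
--         return out
--
--     def roll_right(row):
--         return roll_left(row[::-1])[::-1]
--
--     def transpose(grid):
--         return [list(col) for col in zip(*grid)]
--
--     grid = transpose([roll_left(col) for col in transpose(raw_input)])   # north
--     grid = [roll_left(row) for row in grid]                              # west
--     grid = transpose([roll_right(col) for col in transpose(grid)])       # south
--     grid = [roll_right(row) for row in grid]                             # east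
--     return grid
-- ===== Notes on version B (the rewrite author's own statement) =====
-- stated objective: faster
-- what changed: Each of the four directions is computed by one counting pass per row/column ('#'-segments rebuilt as O's then dots, columns handled via transpose) instead of A's per-rock bubble scan over the grid.
-- outside the precondition, e.g. on move_rocks_cycle([['#'], [], ['.']]): A returns [['#'], [], ['.']], B returns []; on move_rocks_cycle([['.'], ['O', 'O']]): A raises IndexError, B returns [['.'], ['O']]
import Mathlib
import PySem

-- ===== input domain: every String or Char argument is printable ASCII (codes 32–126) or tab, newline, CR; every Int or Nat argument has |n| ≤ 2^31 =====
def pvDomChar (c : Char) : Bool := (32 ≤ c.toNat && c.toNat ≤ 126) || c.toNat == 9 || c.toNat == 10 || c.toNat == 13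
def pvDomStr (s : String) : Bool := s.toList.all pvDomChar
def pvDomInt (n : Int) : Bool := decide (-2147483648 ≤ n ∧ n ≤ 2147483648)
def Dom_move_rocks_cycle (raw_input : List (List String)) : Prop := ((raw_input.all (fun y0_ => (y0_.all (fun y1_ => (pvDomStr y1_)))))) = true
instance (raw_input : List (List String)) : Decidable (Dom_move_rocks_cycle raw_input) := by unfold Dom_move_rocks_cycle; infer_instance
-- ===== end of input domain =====

-- B rebuilds each row/column in one counting pass per direction instead of A's per-rock bubble scans (equal on rectangular grids).

-- ===== PORT A =====
def pvCell (g : List (List String)) (i j : Nat) : String := (g.getD i []).getD j ""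

def pvSetCell (g : List (List String)) (i j : Nat) (v : String) : List (List String) :=
  g.set i ((g.getD i []).set j v)

-- while current - 1 >= 0 and transformed[current-1][mod_j] == ".": current -= 1
def pvScanUp (g : List (List String)) (j : Nat) : Nat → Nat
  | 0 => 0
  | c + 1 => if pvCell g c j = "." then pvScanUp g j c else c + 1

-- while current - 1 >= 0 and transformed[mod_i][current-1] == ".": current -= 1
def pvScanLeft (g : List (List String)) (i : Nat) : Nat → Nat
  | 0 => 0
  | c + 1 => if pvCell g i c = "." then pvScanLeft g i c else c + 1

-- while current + 1 < len(transformed) and transformed[current+1][mod_j] == ".": current += 1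
def pvScanDown (g : List (List String)) (bound j c : Nat) : Nat :=
  if _h : c + 1 < bound then
    if pvCell g (c + 1) j = "." then pvScanDown g bound j (c + 1) else c
  else c
termination_by bound - c

-- while current + 1 < len(transformed[0]) and transformed[mod_i][current+1] == ".": current += 1
def pvScanRight (g : List (List String)) (bound i c : Nat) : Nat :=
  if _h : c + 1 < bound then
    if pvCell g i (c + 1) = "." then pvScanRight g bound i (c + 1) else c
  else c
termination_by bound - c

-- the body of A's inner j-loop, for one direction
def pvStepA (dir : String) (g : List (List String)) (i j : Nat) : List (List String) :=
  let mi := if dir = "north" ∨ dir = "west" then i else g.length - 1 - i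
  let mj := if dir = "north" ∨ dir = "west" then j else (g.getD i []).length - 1 - j
  if pvCell g mi mj = "." ∨ pvCell g mi mj = "#" then g
  else
    let cur0 := if dir = "north" ∨ dir = "south" then mi else mj
    let cur :=
      if dir = "north" then pvScanUp g mj cur0
      else if dir = "west" then pvScanLeft g mi cur0
      else if dir = "south" then pvScanDown g g.length mj cur0
      else pvScanRight g (g.getD 0 []).length mi cur0
    if dir = "north" ∨ dir = "south" then
      pvSetCell (pvSetCell g mi mj ".") cur mj "O"
    else
      pvSetCell (pvSetCell g mi mj ".") mi cur "O"

-- for i, line in enumerate(transformed): for j, _ in enumerate(line): …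
def pvPassA (dir : String) (g0 : List (List String)) : List (List String) :=
  (List.range g0.length).foldl
    (fun g i => (List.range ((g.getD i []).length)).foldl (fun g' j => pvStepA dir g' i j) g) g0

def move_rocks_cycle (raw_input : List (List String)) : List (List String) :=
  -- transformed = [row[:] for row in raw_input] only copies; with immutable lists the copy is the list itself
  ["north", "west", "south", "east"].foldl (fun g d => pvPassA d g) raw_input

-- ===== PORT B =====
def pvRollLeft (row : List String) : List String :=
  let s := row.foldl
    (fun (st : List String × Nat × Nat) cell =>
      if cell = "#" then
        (st.1 ++ List.replicate st.2.1 "O" ++ List.replicate st.2.2 "." ++ ["#"], 0, 0)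
      else if cell = "." then (st.1, st.2.1, st.2.2 + 1)
      else (st.1, st.2.1 + 1, st.2.2))
    ([], 0, 0)
  s.1 ++ List.replicate s.2.1 "O" ++ List.replicate s.2.2 "."

def pvRollRight (row : List String) : List String := (pvRollLeft row.reverse).reverse

-- [list(col) for col in zip(*grid)] : zip stops at the shortest row
def pvTranspose (g : List (List String)) : List (List String) :=
  if h : g ≠ [] ∧ g.all (fun r => !r.isEmpty) then
    (g.map (fun r => r.headD "")) :: pvTranspose (g.map (fun r => r.tail))
  else []
termination_by (g.headD []).length
decreasing_by
  obtain ⟨h1, h2⟩ := h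
  cases g with
  | nil => exact absurd rfl h1
  | cons r t =>
    simp only [List.headD_cons]
    have : ¬ r.isEmpty := by
      have := (List.all_eq_true.mp h2) r (by simp)
      simpa using this
    cases r with
    | nil => simp at this
    | cons a r' => simp

def move_rocks_cycle_alt (raw_input : List (List String)) : List (List String) :=
  if raw_input = [] ∨ raw_input.headD [] = [] then raw_input.map (fun r => r)
  else
    let g1 := pvTranspose ((pvTranspose raw_input).map pvRollLeft)
    let g2 := g1.map pvRollLeft
    let g3 := pvTranspose ((pvTranspose g2).map pvRollRight)
    g3.map pvRollRight

-- ===== PRECONDITION & SPEC =====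
-- Pre_ excludes ragged grids (rows of unequal length): on most of them A raises IndexError from its
-- cross-row column scans, and on the rest the scan bound len(transformed[0]) and per-row lengths make
-- A's value an accident of its implementation.
def Pre_move_rocks_cycle (raw_input : List (List String)) : Prop :=
  ∀ r ∈ raw_input, r.length = (raw_input.headD []).length

instance (raw_input : List (List String)) : Decidable (Pre_move_rocks_cycle raw_input) := by
  unfold Pre_move_rocks_cycle; infer_instance

def pvWitness_move_rocks_cycle : List (List String) :=
  [["O", ".", "#"], [".", ".", "O"], ["#", "O", "."]]

def Spec_move_rocks_cycle (raw_input : List (List String)) (out : List (List String)) : Prop := out = move_rocks_cycle_alt raw_input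
instance (raw_input : List (List String)) (out : List (List String)) : Decidable (Spec_move_rocks_cycle raw_input out) := by unfold Spec_move_rocks_cycle; infer_instance

-- ===== CLAIM (what is proved, stated in full; the proofs are below) =====
def Claim_equal_move_rocks_cycle : Prop := ∀ (raw_input : List (List String)), Dom_move_rocks_cycle raw_input → Pre_move_rocks_cycle raw_input → Spec_move_rocks_cycle raw_input (move_rocks_cycle raw_input)

-- ===== LEMMAS AND PROOFS =====

-- Specification-level row operation: `cmpR` compresses a reversed row so that in
-- each '#'-delimited segment all rocks come first (as "O") followed by the dots.
def cmpR : List String → List String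
  | [] => []
  | x :: t =>
    if x = "#" then "#" :: cmpR t
    else if x = "." then "." :: cmpR t
    else (cmpR t).takeWhile (· = ".") ++ "O" :: (cmpR t).dropWhile (· = ".")

def cmpr (l : List String) : List String := (cmpR l.reverse).reverse

def dotsOf (p : List String) : Nat := ((cmpR p.reverse).takeWhile (· = ".")).length

def stemOf (p : List String) : List String := ((cmpR p.reverse).dropWhile (· = ".")).reverse

-- abstract, list-level versions of A's bubble step (left/up and right/down)
def scanL (r : List String) : Nat → Nat
  | 0 => 0
  | c + 1 => if r.getD c "" = "." then scanL r c else c + 1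

def stepRow (r : List String) (k : Nat) : List String :=
  if r.getD k "" = "." ∨ r.getD k "" = "#" then r
  else (r.set k ".").set (scanL r k) "O"

def passRow (r : List String) : List String := (List.range r.length).foldl stepRow r

def scanRt (r : List String) (bound c : Nat) : Nat :=
  if _h : c + 1 < bound then
    if r.getD (c + 1) "" = "." then scanRt r bound (c + 1) else c
  else c
termination_by bound - c

def stepRowR (r : List String) (n k : Nat) : List String :=
  if r.getD (n - 1 - k) "" = "." ∨ r.getD (n - 1 - k) "" = "#" then r
  else (r.set (n - 1 - k) ".").set (scanRt r n (n - 1 - k)) "O"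

def rollR (r : List String) : List String := (cmpr r.reverse).reverse

-- the columns (first n of them) of a grid, as a grid
def gcols (n : Nat) (g : List (List String)) : List (List String) :=
  (List.range n).map (fun j => g.map (fun r => r.getD j ""))

-- ---------- basic lengths ----------
theorem cmpR_length (l : List String) : (cmpR l).length = l.length := by
  induction l with
  | nil => rfl
  | cons x t ih =>
    simp only [cmpR]
    split_ifs with h1 h2
    · simp [ih]
    · simp [ih]
    · have h : ((cmpR t).takeWhile (· = ".")).length + ((cmpR t).dropWhile (· = ".")).length
          = (cmpR t).length := by
        rw [← List.length_append, List.takeWhile_append_dropWhile]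
      simp only [List.length_append, List.length_cons]
      omega

theorem cmpr_length (l : List String) : (cmpr l).length = l.length := by
  simp [cmpr, cmpR_length]

theorem stepRow_length (r : List String) (k : Nat) : (stepRow r k).length = r.length := by
  unfold stepRow; split_ifs <;> simp

theorem stepRowR_length (r : List String) (n k : Nat) : (stepRowR r n k).length = r.length := by
  unfold stepRowR; split_ifs <;> simp

theorem rollR_length (r : List String) : (rollR r).length = r.length := by
  simp [rollR, cmpr_length]

-- ---------- takeWhile/dropWhile helpers ----------
theorem head?_dropWhile_not (p : String → Bool) (l : List String) (a : String)
    (h : (l.dropWhile p).head? = some a) : p a = false := by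
  induction l with
  | nil => simp at h
  | cons x t ih =>
    by_cases hx : p x
    · simp [List.dropWhile, hx] at h; exact ih h
    · simp [List.dropWhile, hx] at h
      subst h; simpa using hx

theorem takeWhile_dots_replicate (l : List String) :
    l.takeWhile (· = ".") = List.replicate (l.takeWhile (· = ".")).length "." := by
  apply List.eq_replicate_of_mem
  intro a ha
  have := List.mem_takeWhile_imp ha
  simpa using this

theorem dots_split (s : Nat) (v : List String) (hv : v.head? ≠ some ".") :
    (List.replicate s "." ++ v).takeWhile (· = ".") = List.replicate s "." ∧
    (List.replicate s "." ++ v).dropWhile (· = ".") = v := by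
  induction s with
  | zero =>
    simp only [List.replicate, List.nil_append]
    cases v with
    | nil => simp
    | cons a t =>
      have ha : a ≠ "." := by intro h; subst h; simp at hv
      simp [List.takeWhile, List.dropWhile, ha]
  | succ n ih =>
    simp only [List.replicate_succ, List.cons_append]
    constructor <;> simp [List.takeWhile, List.dropWhile, (ih).1, (ih).2]

-- ---------- cmpr decomposition and snoc rules ----------
theorem cmpr_decomp (p : List String) :
    cmpr p = stemOf p ++ List.replicate (dotsOf p) "." := by
  unfold cmpr stemOf dotsOf
  conv_lhs => rw [← List.takeWhile_append_dropWhile (p := fun s => decide (s = ".")) (l := cmpR p.reverse)]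
  rw [List.reverse_append]
  congr 1
  rw [takeWhile_dots_replicate (cmpR p.reverse)]
  simp

theorem stemOf_getLast? (p : List String) : (stemOf p).getLast? ≠ some "." := by
  unfold stemOf
  rw [List.getLast?_reverse]
  intro h
  have := head?_dropWhile_not _ _ _ h
  simp at this

theorem cmpr_snoc_sharp (p : List String) : cmpr (p ++ ["#"]) = cmpr p ++ ["#"] := by
  simp [cmpr, List.reverse_append, cmpR]

theorem cmpr_snoc_dot (p : List String) : cmpr (p ++ ["."]) = cmpr p ++ ["."] := by
  simp [cmpr, List.reverse_append, cmpR]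

theorem cmpr_snoc_rock (p : List String) (x : String) (h1 : x ≠ ".") (h2 : x ≠ "#") :
    cmpr (p ++ [x]) = stemOf p ++ "O" :: List.replicate (dotsOf p) "." := by
  unfold cmpr stemOf dotsOf
  rw [List.reverse_append]
  simp only [List.reverse_cons, List.reverse_nil, List.nil_append, List.singleton_append]
  rw [show cmpR (x :: p.reverse) = (cmpR p.reverse).takeWhile (· = ".") ++ "O" :: (cmpR p.reverse).dropWhile (· = ".") by
    simp [cmpR, h1, h2]]
  rw [List.reverse_append, List.reverse_cons]
  rw [takeWhile_dots_replicate (cmpR p.reverse)]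
  simp

theorem stem_snoc_sharp (p : List String) :
    stemOf (p ++ ["#"]) = cmpr p ++ ["#"] ∧ dotsOf (p ++ ["#"]) = 0 := by
  unfold stemOf dotsOf cmpr
  rw [List.reverse_append]
  simp [cmpR, List.dropWhile, List.takeWhile]

theorem stem_snoc_dot (p : List String) :
    stemOf (p ++ ["."]) = stemOf p ∧ dotsOf (p ++ ["."]) = dotsOf p + 1 := by
  unfold stemOf dotsOf
  rw [List.reverse_append]
  simp [cmpR, List.dropWhile, List.takeWhile]

theorem stem_snoc_rock (p : List String) (x : String) (h1 : x ≠ ".") (h2 : x ≠ "#") :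
    stemOf (p ++ [x]) = stemOf p ++ ["O"] ∧ dotsOf (p ++ [x]) = dotsOf p := by
  unfold stemOf dotsOf
  rw [List.reverse_append]
  simp only [List.reverse_cons, List.reverse_nil, List.nil_append, List.singleton_append]
  rw [show cmpR (x :: p.reverse) = (cmpR p.reverse).takeWhile (· = ".") ++ "O" :: (cmpR p.reverse).dropWhile (· = ".") by
    simp [cmpR, h1, h2]]
  have hsplit := dots_split ((cmpR p.reverse).takeWhile (· = ".")).length
    ("O" :: (cmpR p.reverse).dropWhile (· = ".")) (by simp)
  rw [takeWhile_dots_replicate (cmpR p.reverse)]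
  rw [hsplit.1, hsplit.2]
  simp

-- ---------- B's one-pass fold computes cmpr ----------
-- the literal step function of pvRollLeft's foldl
def rlStep (st : List String × Nat × Nat) (cell : String) : List String × Nat × Nat :=
  if cell = "#" then
    (st.1 ++ List.replicate st.2.1 "O" ++ List.replicate st.2.2 "." ++ ["#"], 0, 0)
  else if cell = "." then (st.1, st.2.1, st.2.2 + 1)
  else (st.1, st.2.1 + 1, st.2.2)

theorem roll_state (p : List String) :
    (p.foldl rlStep ([], 0, 0)).1 ++ List.replicate (p.foldl rlStep ([], 0, 0)).2.1 "O" = stemOf p ∧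
    (p.foldl rlStep ([], 0, 0)).2.2 = dotsOf p := by
  induction p using List.reverseRecOn with
  | nil => simp [stemOf, dotsOf, cmpR, rlStep]
  | append_singleton p x ih =>
    rw [List.foldl_concat]
    by_cases hx : x = "#"
    · subst hx
      have h := stem_snoc_sharp p
      simp only [rlStep, if_pos rfl]
      refine ⟨?_, by simpa using h.2.symm⟩
      rw [h.1, cmpr_decomp]
      simp [← ih.1, ← ih.2]
    · by_cases hd : x = "."
      · subst hd
        have h := stem_snoc_dot p
        simp only [rlStep, if_neg (by decide : ¬ (("." : String) = "#")), if_pos rfl]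
        exact ⟨by simpa [h.1] using ih.1, by simpa [h.2] using ih.2⟩
      · have h := stem_snoc_rock p x hd hx
        simp only [rlStep, if_neg hx, if_neg hd]
        refine ⟨?_, by simpa [h.2] using ih.2⟩
        rw [← h.1.symm, ← ih.1]
        simp [List.replicate_succ']

theorem pvRollLeft_eq (r : List String) : pvRollLeft r = cmpr r := by
  have h : pvRollLeft r
      = (r.foldl rlStep ([], 0, 0)).1 ++ List.replicate (r.foldl rlStep ([], 0, 0)).2.1 "O"
        ++ List.replicate (r.foldl rlStep ([], 0, 0)).2.2 "." := rfl
  rw [h, cmpr_decomp, ← (roll_state r).1, ← (roll_state r).2]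

-- ---------- scanL and the bubble step ----------
theorem scanL_le (r : List String) (k : Nat) : scanL r k ≤ k := by
  induction k with
  | zero => simp [scanL]
  | succ c ih => simp only [scanL]; split_ifs <;> omega

theorem scanL_spec : ∀ (t : Nat) (u s : List String), u.getLast? ≠ some "." →
    scanL (u ++ (List.replicate t "." ++ s)) (u.length + t) = u.length := by
  intro t
  induction t with
  | zero =>
    intro u s hu
    simp only [List.replicate, List.nil_append, Nat.add_zero]
    cases hl : u.length with
    | zero => simp [scanL]
    | succ c =>
      have hne : u ≠ [] := by intro h; subst h; simp at hl
      have hc : c < u.length := by omega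
      have hget : (u ++ s).getD c "" = u.getLast hne := by
        rw [List.getD_append _ _ _ _ hc, List.getD_eq_getElem _ _ hc,
          List.getLast_eq_getElem]
        congr 1
        omega
      have hlast : u.getLast hne ≠ "." := by
        intro h
        apply hu
        rw [← h, List.getLast?_eq_some_getLast hne]
      simp only [scanL, hget]
      rw [if_neg hlast]
  | succ t ih =>
    intro u s hu
    have harr : u.length + (t + 1) = (u.length + t) + 1 := by omega
    rw [harr]
    simp only [scanL]
    have hget : (u ++ (List.replicate (t + 1) "." ++ s)).getD (u.length + t) "" = "." := by
      rw [List.getD_append_right _ _ _ _ (by omega)]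
      have : u.length + t - u.length = t := by omega
      rw [this, List.getD_append _ _ _ _ (by simp), List.getD_replicate]
      omega
    rw [if_pos hget]
    have hre : u ++ (List.replicate (t + 1) "." ++ s)
        = u ++ (List.replicate t "." ++ ("." :: s)) := by
      rw [List.replicate_succ']
      simp
    rw [hre]
    exact ih u ("." :: s) hu

theorem set_append_len (l1 l2 : List String) (n : Nat) (v : String) :
    (l1 ++ l2).set (l1.length + n) v = l1 ++ l2.set n v := by
  induction l1 with
  | nil => simp
  | cons a t ih =>
    simp only [List.cons_append, List.length_cons]
    rw [show t.length + 1 + n = (t.length + n) + 1 by omega]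
    simp [ih]

theorem stepRow_core (p : List String) (x : String) (s : List String) :
    stepRow (cmpr p ++ x :: s) p.length = cmpr (p ++ [x]) ++ s := by
  have hlen : (cmpr p).length = p.length := cmpr_length p
  have hget : (cmpr p ++ x :: s).getD p.length "" = x := by
    rw [← hlen, List.getD_append_right _ _ _ _ (le_refl _)]
    simp
  by_cases hx : x = "." ∨ x = "#"
  · rw [stepRow, if_pos (by rw [hget]; exact hx)]
    rcases hx with h | h <;> subst h
    · rw [cmpr_snoc_dot]; simp
    · rw [cmpr_snoc_sharp]; simp
  · push_neg at hx
    rw [stepRow, if_neg (by rw [hget]; push_neg; exact hx)]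
    have hdec := cmpr_decomp p
    have hstemlen : (stemOf p).length + dotsOf p = p.length := by
      have := congrArg List.length hdec
      simp at this
      omega
    have hscan : scanL (cmpr p ++ x :: s) p.length = (stemOf p).length := by
      have hre : cmpr p ++ x :: s = stemOf p ++ (List.replicate (dotsOf p) "." ++ (x :: s)) := by
        rw [hdec]; simp
      rw [hre, ← hstemlen]
      exact scanL_spec (dotsOf p) (stemOf p) (x :: s) (stemOf_getLast? p)
    rw [hscan]
    have hset1 : (cmpr p ++ x :: s).set p.length "." = cmpr p ++ "." :: s := by
      rw [← hlen]
      have := set_append_len (cmpr p) (x :: s) 0 "."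
      simpa using this
    rw [hset1]
    have hre2 : cmpr p ++ "." :: s
        = stemOf p ++ ("." :: (List.replicate (dotsOf p) "." ++ s)) := by
      rw [hdec]
      simp only [List.append_assoc, List.cons_append]
      congr 1
      rw [show ("." :: (List.replicate (dotsOf p) "." ++ s))
            = ("." :: List.replicate (dotsOf p) ".") ++ s by simp]
      rw [show ("." :: List.replicate (dotsOf p) ".") = List.replicate (dotsOf p) "." ++ ["."] by
        rw [← List.replicate_succ, List.replicate_succ']]
      simp
    rw [hre2]
    have hset2 := set_append_len (stemOf p) ("." :: (List.replicate (dotsOf p) "." ++ s)) 0 "O"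
    simp only [Nat.add_zero] at hset2
    rw [hset2]
    rw [cmpr_snoc_rock p x hx.1 hx.2]
    simp

theorem passRow_inv (r : List String) : ∀ k, k ≤ r.length →
    (List.range k).foldl stepRow r = cmpr (r.take k) ++ r.drop k := by
  intro k
  induction k with
  | zero => intro _; simp [cmpr, cmpR]
  | succ k ih =>
    intro hk
    have hklt : k < r.length := by omega
    rw [List.range_succ, List.foldl_append, List.foldl_cons, List.foldl_nil,
      ih (by omega)]
    have hx : r.drop k = r[k] :: r.drop (k + 1) := List.drop_eq_getElem_cons hklt
    rw [hx]
    have hlen : (r.take k).length = k := by simp; omega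
    have hcore := stepRow_core (r.take k) r[k] (r.drop (k + 1))
    rw [hlen] at hcore
    rw [hcore, List.take_append_getElem]

theorem passRow_eq (r : List String) : passRow r = cmpr r := by
  have := passRow_inv r r.length (le_refl _)
  simpa [passRow] using this

-- ---------- reverse mirroring ----------
theorem getD_reverse {α : Type} (l : List α) (d : α) (k : Nat) (h : k < l.length) :
    l.reverse.getD k d = l.getD (l.length - 1 - k) d := by
  rw [List.getD_eq_getElem?_getD, List.getD_eq_getElem?_getD,
    List.getElem?_reverse (by simpa using h)]

theorem set_reverse {α : Type} (l : List α) (v : α) (k : Nat) (h : k < l.length) :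
    (l.set (l.length - 1 - k) v).reverse = l.reverse.set k v := by
  apply List.ext_getElem
  · simp
  · intro n h1 h2
    simp only [List.length_reverse, List.length_set] at h1 h2
    simp only [List.getElem_reverse, List.getElem_set, List.length_set, List.length_reverse]
    split_ifs with hh1 hh2 hh2 <;> first | rfl | omega

theorem scanRt_mirror (r : List String) (n : Nat) (hr : r.length = n) :
    ∀ k, k < n → scanRt r n (n - 1 - k) = n - 1 - scanL r.reverse k := by
  subst hr
  intro k
  induction k with
  | zero =>
    intro hk
    unfold scanRt
    rw [dif_neg (by omega)]
    simp [scanL]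
  | succ k ih =>
    intro hk
    have hk' : k < r.length := by omega
    unfold scanRt
    rw [dif_pos (by omega : r.length - 1 - (k + 1) + 1 < r.length)]
    have hpos : r.length - 1 - (k + 1) + 1 = r.length - 1 - k := by omega
    rw [hpos]
    have hcell : r.getD (r.length - 1 - k) "" = r.reverse.getD k "" := by
      rw [getD_reverse r "" k (by omega)]
    rw [hcell]
    simp only [scanL]
    split_ifs with h
    · exact ih hk'
    · omega

theorem scanRt_lt (r : List String) (n c : Nat) (h : c < n) : scanRt r n c < n := by
  unfold scanRt
  split_ifs with h1 h2
  · exact scanRt_lt r n (c + 1) h1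
  · exact h
  · exact h
termination_by n - c

theorem stepRowR_mirror (r : List String) (n k : Nat) (hr : r.length = n) (hk : k < n) :
    stepRowR r n k = (stepRow r.reverse k).reverse := by
  subst hr
  have hget : r.getD (r.length - 1 - k) "" = r.reverse.getD k "" := by
    rw [getD_reverse r "" k (by omega)]
  unfold stepRowR stepRow
  rw [hget]
  split_ifs with h
  · simp
  · have hc : scanL r.reverse k ≤ k := scanL_le _ _
    have hscan : scanRt r r.length (r.length - 1 - k) = r.length - 1 - scanL r.reverse k :=
      scanRt_mirror r r.length rfl k hk
    rw [hscan]
    have h1 : (r.set (r.length - 1 - k) ".").reverse = r.reverse.set k "." :=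
      set_reverse r "." k (by omega)
    have hlen1 : (r.set (r.length - 1 - k) ".").length = r.length := by simp
    have h2 : ((r.set (r.length - 1 - k) ".").set (r.length - 1 - scanL r.reverse k) "O").reverse
        = (r.set (r.length - 1 - k) ".").reverse.set (scanL r.reverse k) "O" := by
      have := set_reverse (r.set (r.length - 1 - k) ".") "O" (scanL r.reverse k)
        (by rw [hlen1]; omega)
      rw [hlen1] at this
      exact this
    rw [← List.reverse_reverse (((r.set (r.length - 1 - k) ".").set
      (r.length - 1 - scanL r.reverse k) "O"))]
    rw [h2, h1]

theorem foldl_mirror (n : Nat) : ∀ (js : List Nat) (r : List String),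
    (∀ k ∈ js, k < n) → r.length = n →
    js.foldl (fun r k => stepRowR r n k) r = (js.foldl stepRow r.reverse).reverse := by
  intro js
  induction js with
  | nil => intro r _ _; simp
  | cons k ks ih =>
    intro r hmem hr
    simp only [List.foldl_cons]
    rw [stepRowR_mirror r n k hr (hmem k (by simp))]
    have hlen : ((stepRow r.reverse k).reverse).length = n := by
      simp [stepRow_length, hr]
    rw [ih _ (fun k hk => hmem k (by simp [hk])) hlen]
    rw [List.reverse_reverse]

theorem passRowR_eq (r : List String) (n : Nat) (hr : r.length = n) :
    (List.range n).foldl (fun r k => stepRowR r n k) r = rollR r := by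
  rw [foldl_mirror n (List.range n) r (by simp) hr]
  have : (List.range n).foldl stepRow r.reverse = passRow r.reverse := by
    unfold passRow
    rw [List.length_reverse, hr]
  rw [this, passRow_eq, rollR]

theorem pvRollRight_eq (r : List String) : pvRollRight r = rollR r := by
  simp [pvRollRight, rollR, pvRollLeft_eq]

-- ---------- generic fold lemmas ----------
theorem foldl_set_shift {α : Type} (d : α) (F : α → α) :
    ∀ (js : List Nat) (x : α) (t : List α),
    js.foldl (fun s i => s.set (i + 1) (F (s.getD (i + 1) d))) (x :: t)
      = x :: js.foldl (fun s i => s.set i (F (s.getD i d))) t := by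
  intro js
  induction js with
  | nil => intro x t; rfl
  | cons j ks ih =>
    intro x t
    simp only [List.foldl_cons, List.set_cons_succ, List.getD_cons_succ]
    exact ih x _

theorem foldl_set_map {α : Type} (d : α) (F : α → α) :
    ∀ (l : List α),
    (List.range l.length).foldl (fun s i => s.set i (F (s.getD i d))) l = l.map F := by
  intro l
  induction l with
  | nil => rfl
  | cons a t ih =>
    rw [List.length_cons, List.range_succ_eq_map, List.foldl_cons]
    simp only [List.set_cons_zero, List.getD_cons_zero]
    rw [List.foldl_map]
    simp only [Nat.succ_eq_add_one]
    rw [foldl_set_shift d F (List.range t.length) (F a) t, ih]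
    rfl

theorem foldl_rev_sim {α : Type} (d : α) (F : α → α) (n : Nat) :
    ∀ (js : List Nat) (s : List α), (∀ k ∈ js, k < n) → s.length = n →
    js.foldl (fun s i => s.set (n - 1 - i) (F (s.getD (n - 1 - i) d))) s
      = (js.foldl (fun s i => s.set i (F (s.getD i d))) s.reverse).reverse := by
  intro js
  induction js with
  | nil => intro s _ _; simp
  | cons k ks ih =>
    intro s hmem hs
    simp only [List.foldl_cons]
    have hk : k < n := hmem k (by simp)
    have hgd : s.reverse.getD k d = s.getD (n - 1 - k) d := by
      rw [getD_reverse s d k (by omega), hs]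
    have hset : s.set (n - 1 - k) (F (s.getD (n - 1 - k) d))
        = (s.reverse.set k (F (s.reverse.getD k d))).reverse := by
      rw [hgd]
      rw [← set_reverse s (F (s.getD (n - 1 - k) d)) k (by omega)]
      rw [hs, List.reverse_reverse]
    rw [hset]
    rw [ih _ (fun k hk => hmem k (by simp [hk])) (by simp [hs])]
    rw [List.reverse_reverse]

theorem foldl_set_map_rev {α : Type} (d : α) (F : α → α) (n : Nat) (l : List α)
    (hl : l.length = n) :
    (List.range n).foldl (fun s i => s.set (n - 1 - i) (F (s.getD (n - 1 - i) d))) l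
      = l.map F := by
  rw [foldl_rev_sim d F n _ _ (by simp) hl]
  have h2 : (List.range n).foldl (fun s i => s.set i (F (s.getD i d))) l.reverse
      = l.reverse.map F := by
    have := foldl_set_map d F l.reverse
    rw [List.length_reverse, hl] at this
    exact this
  rw [h2, List.map_reverse, List.reverse_reverse]

theorem foldl_inv_congr {σ β : Type} (P : σ → Prop) :
    ∀ (js : List β) (s : σ) (b1 b2 : σ → β → σ),
    P s → (∀ s k, P s → k ∈ js → b1 s k = b2 s k ∧ P (b1 s k)) →
    js.foldl b1 s = js.foldl b2 s := by
  intro js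
  induction js with
  | nil => intros; rfl
  | cons k ks ih =>
    intro s b1 b2 hP h
    simp only [List.foldl_cons]
    have hk := h s k hP (by simp)
    rw [← hk.1]
    exact ih (b1 s k) b1 b2 hk.2 (fun s k hPs hks => h s k hPs (by simp [hks]))

theorem set_getD_self (g : List (List String)) (i : Nat) (h : i < g.length) :
    g.set i (g.getD i []) = g := by
  rw [List.getD_eq_getElem _ _ h]
  exact List.set_getElem_self h

theorem getD_set_self {α : Type} (l : List α) (i : Nat) (v : α) (d : α) (h : i < l.length) :
    (l.set i v).getD i d = v := by
  rw [List.getD_eq_getElem _ _ (by simpa using h)]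
  exact List.getElem_set_self (by simpa using h)

theorem foldl_row_local : ∀ (js : List Nat) (g : List (List String)) (i : Nat)
    (S : List String → Nat → List String), i < g.length →
    js.foldl (fun g j => g.set i (S (g.getD i []) j)) g
      = g.set i (js.foldl S (g.getD i [])) := by
  intro js
  induction js with
  | nil => intro g i S hi; exact (set_getD_self g i hi).symm
  | cons j ks ih =>
    intro g i S hi
    simp only [List.foldl_cons]
    rw [ih _ i S (by simpa using hi)]
    rw [getD_set_self _ i _ _ hi, List.set_set]

-- ---------- west ----------
theorem pvScanLeft_eq (g : List (List String)) (i : Nat) :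
    ∀ c, pvScanLeft g i c = scanL (g.getD i []) c := by
  intro c
  induction c with
  | zero => rfl
  | succ c ih => simp [pvScanLeft, scanL, pvCell, ih]

theorem stepA_west (g : List (List String)) (i j : Nat) (hi : i < g.length) :
    pvStepA "west" g i j = g.set i (stepRow (g.getD i []) j) := by
  unfold pvStepA stepRow
  simp only [pvCell, String.reduceEq, false_or, or_false, or_self, if_true, if_false,
    reduceIte, pvScanLeft_eq]
  split_ifs with h
  · exact (set_getD_self g i hi).symm
  · unfold pvSetCell
    rw [getD_set_self _ i _ _ hi, List.set_set]

theorem pass_west (g : List (List String)) : pvPassA "west" g = g.map passRow := by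
  unfold pvPassA
  have hcongr := foldl_inv_congr (fun g' : List (List String) => g'.length = g.length)
    (List.range g.length) g
    (fun g i => (List.range ((g.getD i []).length)).foldl (fun g' j => pvStepA "west" g' i j) g)
    (fun g' i => g'.set i (passRow (g'.getD i []))) rfl ?_
  · rw [hcongr]
    exact foldl_set_map [] passRow g
  · intro g' i hP hi
    have hilt : i < g'.length := by rw [hP]; exact List.mem_range.mp hi
    constructor
    · have hinner := foldl_inv_congr (fun h : List (List String) => h.length = g'.length)
        (List.range ((g'.getD i []).length)) g'
        (fun h j => pvStepA "west" h i j)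
        (fun h j => h.set i (stepRow (h.getD i []) j)) rfl ?_
      · beta_reduce
        rw [hinner, foldl_row_local _ _ _ _ hilt]
        rfl
      · intro h j hPh _
        have hih : i < h.length := by rw [hPh]; exact hilt
        beta_reduce
        exact ⟨stepA_west h i j hih, by rw [stepA_west h i j hih]; simp [hPh]⟩
    · have hlen : ∀ (js : List Nat) (h : List (List String)),
          (js.foldl (fun g' j => pvStepA "west" g' i j) h).length = h.length := by
        intro js
        induction js with
        | nil => intro h; rfl
        | cons j js ihj =>
          intro h
          simp only [List.foldl_cons]
          rw [ihj]
          by_cases hih : i < h.length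
          · rw [stepA_west h i j hih]; simp
          · unfold pvStepA
            simp only [pvCell, String.reduceEq, false_or, or_false, or_self, if_true,
              if_false, reduceIte]
            split_ifs
            · rfl
            · unfold pvSetCell; simp
      beta_reduce
      rw [hlen, hP]

theorem pass_west' (g : List (List String)) : pvPassA "west" g = g.map cmpr := by
  rw [pass_west]
  exact List.map_congr_left (fun r _ => passRow_eq r)

-- ---------- east ----------
theorem pvScanRight_eq (g : List (List String)) (b i c : Nat) :
    pvScanRight g b i c = scanRt (g.getD i []) b c := by
  unfold pvScanRight scanRt
  simp only [pvCell]
  split_ifs with h1 h2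
  · exact pvScanRight_eq g b i (c + 1)
  · rfl
  · rfl
termination_by b - c

theorem stepA_east (g : List (List String)) (C i j : Nat) (hi : i < g.length)
    (hC : ∀ r ∈ g, r.length = C) :
    pvStepA "east" g i j
      = g.set (g.length - 1 - i) (stepRowR (g.getD (g.length - 1 - i) []) C j) := by
  have hm : g.length - 1 - i < g.length := by omega
  have hrowi : (g.getD i []).length = C := by
    rw [List.getD_eq_getElem _ _ hi]; exact hC _ (List.getElem_mem hi)
  have hrow0 : (g.getD 0 []).length = C := by
    rw [List.getD_eq_getElem _ _ (by omega)]; exact hC _ (List.getElem_mem (by omega))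
  unfold pvStepA stepRowR
  simp only [pvCell, String.reduceEq, false_or, or_false, or_self, if_true, if_false,
    reduceIte, pvScanRight_eq]
  rw [hrowi, hrow0]
  split_ifs with h
  · exact (set_getD_self g _ hm).symm
  · unfold pvSetCell
    rw [getD_set_self _ _ _ _ hm, List.set_set]

theorem pass_east (g : List (List String)) (R C : Nat) (hR : g.length = R)
    (hC : ∀ r ∈ g, r.length = C) : pvPassA "east" g = g.map rollR := by
  unfold pvPassA
  have hcongr := foldl_inv_congr
    (fun g' : List (List String) => g'.length = R ∧ ∀ r ∈ g', r.length = C)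
    (List.range g.length) g
    (fun g i => (List.range ((g.getD i []).length)).foldl (fun g' j => pvStepA "east" g' i j) g)
    (fun g' i => g'.set (R - 1 - i) (rollR (g'.getD (R - 1 - i) []))) ⟨hR, hC⟩ ?_
  · rw [hcongr, hR]
    exact foldl_set_map_rev [] rollR R g hR
  · intro g' i hP hi
    have hilt : i < g'.length := by rw [hP.1, ← hR]; exact List.mem_range.mp hi
    have hmlt : R - 1 - i < g'.length := by rw [hP.1]; omega
    have hrow : ∀ k, k < g'.length → (g'.getD k []).length = C := by
      intro k hk
      rw [List.getD_eq_getElem _ _ hk]; exact hP.2 _ (List.getElem_mem hk)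
    have hstep : ∀ (h : List (List String)) j, h.length = R ∧ (∀ r ∈ h, r.length = C) →
        pvStepA "east" h i j = h.set (R - 1 - i) (stepRowR (h.getD (R - 1 - i) []) C j) := by
      intro h j hPh
      have := stepA_east h C i j (by rw [hPh.1, ← hP.1]; exact hilt) hPh.2
      rwa [hPh.1] at this
    have hpres : ∀ (h : List (List String)) j, h.length = R ∧ (∀ r ∈ h, r.length = C) →
        (h.set (R - 1 - i) (stepRowR (h.getD (R - 1 - i) []) C j)).length = R ∧
        (∀ r ∈ h.set (R - 1 - i) (stepRowR (h.getD (R - 1 - i) []) C j), r.length = C) := by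
      intro h j hPh
      refine ⟨by simp [hPh.1], ?_⟩
      intro r hr
      rcases List.mem_or_eq_of_mem_set hr with hmem | heq
      · exact hPh.2 _ hmem
      · subst heq
        rw [stepRowR_length]
        have hmh : R - 1 - i < h.length := by rw [hPh.1]; omega
        rw [List.getD_eq_getElem _ _ hmh]
        exact hPh.2 _ (List.getElem_mem hmh)
    constructor
    · beta_reduce
      have hinner := foldl_inv_congr
        (fun h : List (List String) => h.length = R ∧ ∀ r ∈ h, r.length = C)
        (List.range ((g'.getD i []).length)) g'
        (fun h j => pvStepA "east" h i j)
        (fun h j => h.set (R - 1 - i) (stepRowR (h.getD (R - 1 - i) []) C j)) hP ?_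
      · rw [hinner,
          foldl_row_local (List.range ((g'.getD i []).length)) g' (R - 1 - i)
            (fun r j => stepRowR r C j) hmlt]
        rw [hrow i hilt]
        rw [passRowR_eq _ C (hrow _ hmlt)]
      · intro h j hPh _
        beta_reduce
        exact ⟨hstep h j hPh, by rw [hstep h j hPh]; exact hpres h j hPh⟩
    · beta_reduce
      have hfold : ∀ (js : List Nat) (h : List (List String)),
          h.length = R ∧ (∀ r ∈ h, r.length = C) →
          (js.foldl (fun g' j => pvStepA "east" g' i j) h).length = R ∧
          (∀ r ∈ js.foldl (fun g' j => pvStepA "east" g' i j) h, r.length = C) := by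
        intro js
        induction js with
        | nil => intro h hPh; exact hPh
        | cons j js ihj =>
          intro h hPh
          simp only [List.foldl_cons]
          exact ihj _ (by rw [hstep h j hPh]; exact hpres h j hPh)
      exact hfold _ g' hP

-- ---------- columns of a grid ----------
theorem gcols_length (n : Nat) (g : List (List String)) : (gcols n g).length = n := by
  simp [gcols]

theorem gcols_getD (n : Nat) (g : List (List String)) (j : Nat) (hj : j < n) :
    (gcols n g).getD j [] = g.map (fun r => r.getD j "") := by
  rw [List.getD_eq_getElem _ _ (by simpa [gcols] using hj)]
  simp [gcols]

theorem gcols_row_length (n : Nat) (g : List (List String)) :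
    ∀ r ∈ gcols n g, r.length = g.length := by
  intro r hr
  simp only [gcols, List.mem_map] at hr
  obtain ⟨j, _, rfl⟩ := hr
  simp

theorem map_getD_comm (g : List (List String)) (i b : Nat) :
    (g.map (fun r => r.getD i "")).getD b "" = (g.getD b []).getD i "" := by
  by_cases hb : b < g.length
  · rw [List.getD_eq_getElem _ _ (by simpa using hb), List.getD_eq_getElem _ _ hb,
      List.getElem_map]
  · have h1 : g.length ≤ b := by omega
    rw [List.getD_eq_getElem?_getD, List.getElem?_eq_none (by simpa using h1)]
    rw [List.getD_eq_getElem?_getD (l := g), List.getElem?_eq_none h1]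
    rfl

theorem cell_gcols (R : Nat) (cols : List (List String)) (i b : Nat) (hi : i < R) :
    pvCell (gcols R cols) i b = (cols.getD b []).getD i "" := by
  unfold pvCell
  rw [gcols_getD R cols i hi, map_getD_comm]

theorem getD_set_ne {α : Type} (l : List α) (i a : Nat) (v d : α) (h : i ≠ a) :
    (l.set i v).getD a d = l.getD a d := by
  rw [List.getD_eq_getElem?_getD, List.getD_eq_getElem?_getD, List.getElem?_set_ne h]

theorem gcols_gcols (g : List (List String)) (C : Nat) (hC : ∀ r ∈ g, r.length = C) :
    gcols g.length (gcols C g) = g := by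
  apply List.ext_getElem
  · simp [gcols]
  · intro i h1 h2
    simp only [gcols, List.getElem_map, List.getElem_range]
    apply List.ext_getElem
    · simp only [List.length_map, List.length_range]
      exact (hC _ (List.getElem_mem h2)).symm
    · intro j hj1 hj2
      simp only [List.getElem_map, List.getElem_range]
      rw [List.getD_eq_getElem _ _ (by simpa using h2), List.getElem_map]
      rw [List.getD_eq_getElem _ _ (by simpa using hj2)]

theorem setCell_gcols (R : Nat) (cols : List (List String)) (i j : Nat) (v : String)
    (hi : i < R) (hj : j < cols.length) (hcol : (cols.getD j []).length = R) :
    pvSetCell (gcols R cols) i j v = gcols R (cols.set j ((cols.getD j []).set i v)) := by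
  unfold pvSetCell
  rw [gcols_getD R cols i hi]
  apply List.ext_getElem
  · simp [gcols]
  · intro a ha1 ha2
    have haR : a < R := by simpa [gcols] using ha2
    rw [List.getElem_set]
    have hrhs : (gcols R (cols.set j ((cols.getD j []).set i v)))[a]'(by simpa [gcols] using haR)
        = (cols.set j ((cols.getD j []).set i v)).map (fun c => c.getD a "") := by
      simp [gcols]
    rw [hrhs]
    split_ifs with hia
    · subst hia
      apply List.ext_getElem
      · simp
      · intro b hb1 hb2
        simp only [List.length_set, List.length_map] at hb1 hb2
        simp only [List.getElem_map, List.getElem_set]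
        split_ifs with hjb
        · subst hjb
          rw [getD_set_self _ i _ _ (by omega)]
        · rfl
    · have hlhs : (gcols R cols)[a]'(by simpa [gcols] using haR)
          = cols.map (fun c => c.getD a "") := by simp [gcols]
      rw [hlhs]
      apply List.ext_getElem
      · simp
      · intro b hb1 hb2
        simp only [List.length_set, List.length_map] at hb1 hb2
        simp only [List.getElem_map, List.getElem_set]
        split_ifs with hjb
        · subst hjb
          rw [getD_set_ne _ i a _ _ (by omega)]
          rw [List.getD_eq_getElem _ _ (by omega : j < cols.length)]
        · rfl

-- ---------- north ----------
theorem pvScanUp_gcols (R : Nat) (cols : List (List String)) (j : Nat) :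
    ∀ c, c ≤ R → pvScanUp (gcols R cols) j c = scanL (cols.getD j []) c := by
  intro c
  induction c with
  | zero => intro _; rfl
  | succ c ih =>
    intro hc
    simp only [pvScanUp, scanL]
    rw [cell_gcols R cols c j (by omega), ih (by omega)]

theorem pvScanDown_gcols (R : Nat) (cols : List (List String)) (j c : Nat) :
    pvScanDown (gcols R cols) R j c = scanRt (cols.getD j []) R c := by
  unfold pvScanDown scanRt
  by_cases h1 : c + 1 < R
  · rw [dif_pos h1, dif_pos h1, cell_gcols R cols (c + 1) j (by omega)]
    split_ifs
    · exact pvScanDown_gcols R cols j (c + 1)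
    · rfl
  · rw [dif_neg h1, dif_neg h1]
termination_by R - c

theorem stepA_north (R : Nat) (cols : List (List String)) (i j : Nat) (hi : i < R)
    (hj : j < cols.length) (hcols : ∀ c ∈ cols, c.length = R) :
    pvStepA "north" (gcols R cols) i j
      = gcols R (cols.set j (stepRow (cols.getD j []) i)) := by
  have hcj : (cols.getD j []).length = R := by
    rw [List.getD_eq_getElem _ _ hj]; exact hcols _ (List.getElem_mem hj)
  unfold pvStepA stepRow
  simp only [String.reduceEq, true_or, or_true, or_false, false_or, if_true, if_false,
    reduceIte]
  rw [cell_gcols R cols i j hi]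
  rw [pvScanUp_gcols R cols j i (le_of_lt hi)]
  split_ifs with h
  · rw [List.getD_eq_getElem _ _ hj, List.set_getElem_self]
  · have hcur : scanL (cols.getD j []) i ≤ i := scanL_le _ _
    rw [setCell_gcols R cols i j "." hi hj hcj]
    have hlen2 : ((cols.set j ((cols.getD j []).set i ".")).getD j []).length = R := by
      rw [getD_set_self _ j _ _ (by simpa using hj), List.length_set]
      exact hcj
    rw [setCell_gcols R _ (scanL (cols.getD j []) i) j "O" (by omega) (by simpa using hj) hlen2]
    rw [getD_set_self _ j _ _ (by simpa using hj), List.set_set]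

theorem inner_north (R i : Nat) (hi : i < R) :
    ∀ (js : List Nat) (cols : List (List String)), (∀ j ∈ js, j < cols.length) →
    (∀ c ∈ cols, c.length = R) →
    js.foldl (fun g j => pvStepA "north" g i j) (gcols R cols)
      = gcols R (js.foldl (fun cols j => cols.set j (stepRow (cols.getD j []) i)) cols) := by
  intro js
  induction js with
  | nil => intro cols _ _; rfl
  | cons j ks ih =>
    intro cols hmem hlen
    simp only [List.foldl_cons]
    rw [stepA_north R cols i j hi (hmem j (by simp)) hlen]
    apply ih
    · intro j' hj'
      rw [List.length_set]
      exact hmem j' (by simp [hj'])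
    · intro c hc
      rcases List.mem_or_eq_of_mem_set hc with hmem' | heq
      · exact hlen _ hmem'
      · subst heq
        rw [stepRow_length]
        rw [List.getD_eq_getElem _ _ (hmem j (by simp))]
        exact hlen _ (List.getElem_mem _)

theorem outer_north (R C : Nat) :
    ∀ (is : List Nat) (cols : List (List String)), (∀ i ∈ is, i < R) → cols.length = C →
    (∀ c ∈ cols, c.length = R) →
    is.foldl (fun g i => (List.range ((g.getD i []).length)).foldl
        (fun g' j => pvStepA "north" g' i j) g) (gcols R cols)
      = gcols R (is.foldl (fun cols i => cols.map (fun c => stepRow c i)) cols) := by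
  intro is
  induction is with
  | nil => intro cols _ _ _; rfl
  | cons i is ih =>
    intro cols hmem hlen hrows
    simp only [List.foldl_cons]
    have hrow : ((gcols R cols).getD i []).length = cols.length := by
      rw [gcols_getD R cols i (hmem i (by simp))]; simp
    rw [hrow]
    rw [inner_north R i (hmem i (by simp)) (List.range cols.length) cols
      (by intro j hj; exact List.mem_range.mp hj) hrows]
    rw [foldl_set_map [] (fun c => stepRow c i) cols]
    apply ih
    · intro i' hi'; exact hmem i' (by simp [hi'])
    · simp [hlen]
    · intro c hc
      simp only [List.mem_map] at hc
      obtain ⟨c', hc', rfl⟩ := hc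
      rw [stepRow_length]; exact hrows _ hc'

theorem foldl_map_comm {α β : Type} (S : α → β → α) :
    ∀ (is : List β) (cs : List α),
    is.foldl (fun cs i => cs.map (fun c => S c i)) cs = cs.map (fun c => is.foldl S c) := by
  intro is
  induction is with
  | nil => intro cs; simp
  | cons i is ih =>
    intro cs
    simp only [List.foldl_cons]
    rw [ih (cs.map (fun c => S c i)), List.map_map]
    rfl

theorem pass_north (g : List (List String)) (R C : Nat) (hR : g.length = R)
    (hC : ∀ r ∈ g, r.length = C) :
    pvPassA "north" g = gcols R ((gcols C g).map cmpr) := by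
  have hg : gcols R (gcols C g) = g := by rw [← hR]; exact gcols_gcols g C hC
  unfold pvPassA
  rw [hR]
  conv_lhs => rw [← hg]
  rw [outer_north R C (List.range R) (gcols C g) (by intro i hi; exact List.mem_range.mp hi)
    (gcols_length C g) (by intro c hc; rw [gcols_row_length C g c hc, hR])]
  congr 1
  rw [foldl_map_comm stepRow (List.range R) (gcols C g)]
  apply List.map_congr_left
  intro c hc
  have hcR : c.length = R := by rw [gcols_row_length C g c hc, hR]
  have : (List.range R).foldl stepRow c = passRow c := by
    unfold passRow; rw [hcR]
  rw [this, passRow_eq]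

-- ---------- south ----------
theorem stepA_south (R C : Nat) (cols : List (List String)) (i j : Nat) (hi : i < R)
    (hlen : cols.length = C) (hj : j < C) (hcols : ∀ c ∈ cols, c.length = R) :
    pvStepA "south" (gcols R cols) i j
      = gcols R (cols.set (C - 1 - j) (stepRowR (cols.getD (C - 1 - j) []) R i)) := by
  have hj' : C - 1 - j < C := by omega
  have hj'len : C - 1 - j < cols.length := by omega
  have hcj : (cols.getD (C - 1 - j) []).length = R := by
    rw [List.getD_eq_getElem _ _ hj'len]; exact hcols _ (List.getElem_mem hj'len)
  have hmi : R - 1 - i < R := by omega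
  have hrowi : ((gcols R cols).getD i []).length = C := by
    rw [gcols_getD R cols i hi]; simp [hlen]
  unfold pvStepA stepRowR
  simp only [String.reduceEq, or_false, false_or, or_self, if_true, if_false, reduceIte]
  rw [gcols_length, hrowi]
  rw [cell_gcols R cols (R - 1 - i) (C - 1 - j) hmi]
  rw [pvScanDown_gcols R cols (C - 1 - j) (R - 1 - i)]
  split_ifs with h
  · rw [List.getD_eq_getElem _ _ hj'len, List.set_getElem_self]
  · have hcur : scanRt (cols.getD (C - 1 - j) []) R (R - 1 - i) < R :=
      scanRt_lt _ _ _ hmi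
    rw [setCell_gcols R cols (R - 1 - i) (C - 1 - j) "." hmi hj'len hcj]
    have hlen2 : ((cols.set (C - 1 - j) ((cols.getD (C - 1 - j) []).set (R - 1 - i) ".")).getD
        (C - 1 - j) []).length = R := by
      rw [getD_set_self _ _ _ _ (by simpa using hj'len), List.length_set]
      exact hcj
    rw [setCell_gcols R _ (scanRt (cols.getD (C - 1 - j) []) R (R - 1 - i)) (C - 1 - j) "O"
      hcur (by simpa using hj'len) hlen2]
    rw [getD_set_self _ _ _ _ (by simpa using hj'len), List.set_set]

theorem inner_south (R C i : Nat) (hi : i < R) :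
    ∀ (js : List Nat) (cols : List (List String)), (∀ j ∈ js, j < C) →
    cols.length = C → (∀ c ∈ cols, c.length = R) →
    js.foldl (fun g j => pvStepA "south" g i j) (gcols R cols)
      = gcols R (js.foldl
          (fun cols j => cols.set (C - 1 - j) (stepRowR (cols.getD (C - 1 - j) []) R i)) cols) := by
  intro js
  induction js with
  | nil => intro cols _ _ _; rfl
  | cons j ks ih =>
    intro cols hmem hlen hrows
    simp only [List.foldl_cons]
    rw [stepA_south R C cols i j hi hlen (hmem j (by simp)) hrows]
    apply ih
    · intro j' hj'; exact hmem j' (by simp [hj'])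
    · simp [hlen]
    · intro c hc
      rcases List.mem_or_eq_of_mem_set hc with hmem' | heq
      · exact hrows _ hmem'
      · subst heq
        rw [stepRowR_length]
        have : C - 1 - j < cols.length := by rw [hlen]; have := hmem j (by simp); omega
        rw [List.getD_eq_getElem _ _ this]
        exact hrows _ (List.getElem_mem this)

theorem outer_south (R C : Nat) :
    ∀ (is : List Nat) (cols : List (List String)), (∀ i ∈ is, i < R) → cols.length = C →
    (∀ c ∈ cols, c.length = R) →
    is.foldl (fun g i => (List.range ((g.getD i []).length)).foldl
        (fun g' j => pvStepA "south" g' i j) g) (gcols R cols)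
      = gcols R (is.foldl (fun cols i => cols.map (fun c => stepRowR c R i)) cols) := by
  intro is
  induction is with
  | nil => intro cols _ _ _; rfl
  | cons i is ih =>
    intro cols hmem hlen hrows
    simp only [List.foldl_cons]
    have hrow : ((gcols R cols).getD i []).length = C := by
      rw [gcols_getD R cols i (hmem i (by simp))]; simp [hlen]
    rw [hrow]
    rw [inner_south R C i (hmem i (by simp)) (List.range C) cols
      (by intro j hj; exact List.mem_range.mp hj) hlen hrows]
    rw [foldl_set_map_rev [] (fun c => stepRowR c R i) C cols hlen]
    apply ih
    · intro i' hi'; exact hmem i' (by simp [hi'])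
    · simp [hlen]
    · intro c hc
      simp only [List.mem_map] at hc
      obtain ⟨c', hc', rfl⟩ := hc
      rw [stepRowR_length]; exact hrows _ hc'

theorem pass_south (g : List (List String)) (R C : Nat) (hR : g.length = R)
    (hC : ∀ r ∈ g, r.length = C) :
    pvPassA "south" g = gcols R ((gcols C g).map rollR) := by
  have hg : gcols R (gcols C g) = g := by rw [← hR]; exact gcols_gcols g C hC
  unfold pvPassA
  rw [hR]
  conv_lhs => rw [← hg]
  rw [outer_south R C (List.range R) (gcols C g) (by intro i hi; exact List.mem_range.mp hi)
    (gcols_length C g) (by intro c hc; rw [gcols_row_length C g c hc, hR])]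
  congr 1
  rw [foldl_map_comm (fun c i => stepRowR c R i) (List.range R) (gcols C g)]
  apply List.map_congr_left
  intro c hc
  have hcR : c.length = R := by rw [gcols_row_length C g c hc, hR]
  exact passRowR_eq c R hcR

-- ---------- pvTranspose computes gcols on rectangular grids ----------
theorem getD_zero_headD (r : List String) : r.getD 0 "" = r.headD "" := by
  cases r <;> rfl

theorem tail_getD (r : List String) (j : Nat) : r.tail.getD j "" = r.getD (j + 1) "" := by
  cases r <;> rfl

theorem transpose_eq : ∀ (C : Nat) (g : List (List String)), g ≠ [] →
    (∀ r ∈ g, r.length = C) → pvTranspose g = gcols C g := by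
  intro C
  induction C with
  | zero =>
    intro g hne hlen
    unfold pvTranspose
    rw [dif_neg]
    · rfl
    · intro hcon
      cases g with
      | nil => exact hne rfl
      | cons r t =>
        have hr0 : r.length = 0 := hlen r (by simp)
        have : r = [] := List.eq_nil_of_length_eq_zero hr0
        subst this
        have := (List.all_eq_true.mp hcon.2) [] (by simp)
        simp at this
  | succ C ih =>
    intro g hne hlen
    unfold pvTranspose
    rw [dif_pos ⟨hne, by
      rw [List.all_eq_true]
      intro r hr
      have := hlen r hr
      cases r with
      | nil => simp at this
      | cons a t => simp⟩]
    have hne2 : g.map List.tail ≠ [] := by simpa using hne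
    have htail : ∀ r ∈ g.map List.tail, r.length = C := by
      intro r hr
      simp only [List.mem_map] at hr
      obtain ⟨r', hr', rfl⟩ := hr
      have := hlen r' hr'
      simp [this]
    rw [ih (g.map List.tail) hne2 htail]
    unfold gcols
    rw [List.range_succ_eq_map, List.map_cons]
    congr 1
    · exact List.map_congr_left (fun r _ => (getD_zero_headD r).symm)
    · conv_rhs => rw [List.map_map]
      apply List.map_congr_left
      intro j _
      simp only [Function.comp_apply, List.map_map]
      apply List.map_congr_left
      intro r _
      exact tail_getD r j

-- ---------- degenerate grids ----------
theorem foldl_id {β : Type} : ∀ (l : List β) (g : List (List String)),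
    l.foldl (fun g _ => g) g = g := by
  intro l
  induction l with
  | nil => intro g; rfl
  | cons x xs ih => intro g; simpa using ih g

theorem pass_empty_rows (d : String) (g : List (List String))
    (h : ∀ r ∈ g, r.length = 0) : pvPassA d g = g := by
  unfold pvPassA
  have hrow : ∀ (g' : List (List String)), (∀ r ∈ g', r.length = 0) → ∀ i : Nat,
      (g'.getD i []).length = 0 := by
    intro g' hP i
    by_cases hi : i < g'.length
    · rw [List.getD_eq_getElem _ _ hi]
      exact hP _ (List.getElem_mem hi)
    · rw [List.getD_eq_getElem?_getD, List.getElem?_eq_none (by omega)]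
      rfl
  rw [foldl_inv_congr (fun g' : List (List String) => ∀ r ∈ g', r.length = 0)
    (List.range g.length) g _ (fun g _ => g) h ?_]
  · exact foldl_id _ g
  · intro g' i hP _
    beta_reduce
    rw [hrow g' hP i]
    exact ⟨rfl, hP⟩

-- ---------- the main theorem's body ----------
theorem mrc_eq (g : List (List String)) (pre : ∀ r ∈ g, r.length = (g.headD []).length) :
    move_rocks_cycle g = move_rocks_cycle_alt g := by
  have hA : move_rocks_cycle g
      = pvPassA "east" (pvPassA "south" (pvPassA "west" (pvPassA "north" g))) := rfl
  by_cases hg : g = []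
  · subst hg; rfl
  · by_cases hg0 : g.headD [] = []
    · have hzero : ∀ r ∈ g, r.length = 0 := by
        intro r hr; rw [pre r hr, hg0]; rfl
      rw [hA, pass_empty_rows _ _ hzero, pass_empty_rows _ _ hzero,
        pass_empty_rows _ _ hzero, pass_empty_rows _ _ hzero]
      unfold move_rocks_cycle_alt
      rw [if_pos (Or.inr hg0)]
      simp
    · have hRpos : 0 < g.length := List.length_pos_of_ne_nil hg
      have hCpos : 0 < (g.headD []).length := by
        cases hh : g.headD [] with
        | nil => exact absurd hh hg0
        | cons a t => simp [hh]
      set R := g.length with hRdef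
      set C := (g.headD []).length with hCdef
      have hC : ∀ r ∈ g, r.length = C := pre
      -- A's four passes
      have h1 : pvPassA "north" g = gcols R ((gcols C g).map cmpr) := pass_north g R C rfl hC
      set g1 := gcols R ((gcols C g).map cmpr) with hg1def
      have hg1R : g1.length = R := gcols_length _ _
      have hg1C : ∀ r ∈ g1, r.length = C := by
        intro r hr
        rw [gcols_row_length _ _ r hr]
        simp [gcols_length]
      have h2 : pvPassA "west" g1 = g1.map cmpr := pass_west' g1
      set g2 := g1.map cmpr with hg2def
      have hg2R : g2.length = R := by simp [hg2def, hg1R]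
      have hg2C : ∀ r ∈ g2, r.length = C := by
        intro r hr
        simp only [hg2def, List.mem_map] at hr
        obtain ⟨r', hr', rfl⟩ := hr
        rw [cmpr_length]
        exact hg1C _ hr'
      have h3 : pvPassA "south" g2 = gcols R ((gcols C g2).map rollR) :=
        pass_south g2 R C hg2R hg2C
      set g3 := gcols R ((gcols C g2).map rollR) with hg3def
      have hg3R : g3.length = R := gcols_length _ _
      have hg3C : ∀ r ∈ g3, r.length = C := by
        intro r hr
        rw [gcols_row_length _ _ r hr]
        simp [gcols_length]
      have h4 : pvPassA "east" g3 = g3.map rollR := pass_east g3 R C hg3R hg3C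
      -- B's chain
      have hb1 : pvTranspose g = gcols C g := transpose_eq C g hg hC
      have hbm1 : (gcols C g).map pvRollLeft = (gcols C g).map cmpr :=
        List.map_congr_left (fun r _ => pvRollLeft_eq r)
      have hb2 : pvTranspose ((gcols C g).map cmpr) = g1 := by
        rw [hg1def]
        have hlenmap : ((gcols C g).map cmpr).length = C := by simp [gcols_length]
        have := transpose_eq R ((gcols C g).map cmpr)
          (by intro hcon; rw [hcon] at hlenmap; simp at hlenmap; omega)
          (by intro r hr
              simp only [List.mem_map] at hr
              obtain ⟨r', hr', rfl⟩ := hr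
              rw [cmpr_length, gcols_row_length _ _ r' hr'])
        rw [this]
      have hb3 : pvTranspose g2 = gcols C g2 := by
        apply transpose_eq C g2 _ hg2C
        intro hcon
        rw [hcon] at hg2R
        simp at hg2R
        omega
      have hbm2 : (gcols C g2).map pvRollRight = (gcols C g2).map rollR :=
        List.map_congr_left (fun r _ => pvRollRight_eq r)
      have hb4 : pvTranspose ((gcols C g2).map rollR) = g3 := by
        rw [hg3def]
        have hlenmap : ((gcols C g2).map rollR).length = C := by simp [gcols_length]
        have := transpose_eq R ((gcols C g2).map rollR)
          (by intro hcon; rw [hcon] at hlenmap; simp at hlenmap; omega)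
          (by intro r hr
              simp only [List.mem_map] at hr
              obtain ⟨r', hr', rfl⟩ := hr
              rw [rollR_length, gcols_row_length _ _ r' hr', hg2R])
        rw [this]
      have hbm3 : g1.map pvRollLeft = g1.map cmpr :=
        List.map_congr_left (fun r _ => pvRollLeft_eq r)
      have hbm4 : g3.map pvRollRight = g3.map rollR :=
        List.map_congr_left (fun r _ => pvRollRight_eq r)
      have hB : move_rocks_cycle_alt g = g3.map rollR := by
        unfold move_rocks_cycle_alt
        rw [if_neg (by push_neg; exact ⟨hg, hg0⟩)]
        show (pvTranspose ((pvTranspose ((pvTranspose ((pvTranspose g).map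
          pvRollLeft)).map pvRollLeft)).map pvRollRight)).map pvRollRight = g3.map rollR
        rw [hb1, hbm1, hb2, hbm3, ← hg2def, hb3, hbm2, hb4, hbm4]
      rw [hA, h1, h2, h3, h4, hB]

-- ===== VERDICT (by name: the statement is the Claim_ definition above) =====
theorem move_rocks_cycle_spec : Claim_equal_move_rocks_cycle := by
  unfold Claim_equal_move_rocks_cycle Spec_move_rocks_cycle Pre_move_rocks_cycle
  intro raw_input _ pre
  exact mrc_eq raw_input pre
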